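-- pv_equiv track=rewrite | github.com/reversebutterfly/sam2-pre-new | scripts/run_vadi_v5.py | _select_hiera_polish_frames
-- ===== SOURCE A (Python) =====
-- from typing import Any, Callable, Dict, Iterable, List, Optional, Sequence, Tuple
--
-- def _select_hiera_polish_frames(
--     W_attacked: Sequence[int], T_proc: int, polish_window: int,
-- ) -> List[int]:
--     """Polish set for Hiera-steering: insert positions ∪ first
--     `polish_window` post-insert frames per insert (clipped to next
--     insert's position and to T_proc).
--
--     Simpler than boundary-polish's "degraded+aligned" filter — Hiera
--     steering targets ALL post-insert frames in the codex-suggested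
--     "first W_k+1..W_k+3-ish" halo.
--     """
--     W_sorted = sorted(int(w) for w in W_attacked)
--     out: set = set(W_sorted)
--     for i, w in enumerate(W_sorted):
--         next_w = W_sorted[i + 1] if i + 1 < len(W_sorted) else T_proc
--         end = min(w + polish_window, next_w - 1, T_proc - 1)
--         for t in range(w + 1, end + 1):
--             out.add(int(t))
--     return sorted(out)
-- ===== SOURCE B (Python) =====
-- def _select_hiera_polish_frames(W_attacked, T_proc, polish_window):
--     """Interval-merge sweep: each insert w stands for the closed interval
--     [w, max(w, min(w + polish_window, T_proc - 1))]; sweep the intervals in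
--     sorted order keeping only the highest frame emitted so far (hi), and emit
--     each interval's yet-unseen part.  No per-insert clipping at the next
--     insert, no set, no final sort."""
--     out = []
--     hi = None
--     for w in sorted(int(w) for w in W_attacked):
--         h = max(w, min(w + polish_window, T_proc - 1))
--         if hi is not None and w <= hi:
--             if h > hi:
--                 out.extend(range(hi + 1, h + 1))
--                 hi = h
--         else:
--             out.append(w)
--             out.extend(range(w + 1, h + 1))
--             hi = h
--     return out
-- ===== Notes on version B (the rewrite author's own statement) =====
-- stated objective: faster
-- what changed: B replaces A's per-insert halo clipped at the next insert plus set-and-final-sort with an interval-merge sweep: each insert stands for the closed interval [w, max(w, min(w+polish_window, T_proc-1))], and one pass over the sorted inserts keeps only the highest frame emitted so far and emits each interval's unseen part, so the set, the next-insert clipping and the final sort over the whole output disappear.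
import Mathlib
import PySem

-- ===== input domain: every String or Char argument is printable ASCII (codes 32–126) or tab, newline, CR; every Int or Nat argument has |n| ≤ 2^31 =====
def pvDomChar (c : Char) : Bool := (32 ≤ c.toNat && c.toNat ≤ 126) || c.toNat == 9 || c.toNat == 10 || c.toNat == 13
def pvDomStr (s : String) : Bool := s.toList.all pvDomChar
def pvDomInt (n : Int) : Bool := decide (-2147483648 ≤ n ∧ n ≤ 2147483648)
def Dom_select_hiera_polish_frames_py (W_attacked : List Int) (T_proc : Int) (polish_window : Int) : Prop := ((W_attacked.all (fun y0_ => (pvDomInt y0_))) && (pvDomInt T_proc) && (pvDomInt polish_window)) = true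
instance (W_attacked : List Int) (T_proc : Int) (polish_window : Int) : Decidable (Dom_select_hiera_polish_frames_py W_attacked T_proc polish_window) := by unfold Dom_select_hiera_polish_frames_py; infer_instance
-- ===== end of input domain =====

-- B replaces A's set-plus-final-sort with an interval-merge sweep: each insert stands for
-- the closed interval [w, max(w, min(w+polish_window, T_proc-1))] and one sorted pass with
-- a running high-water mark emits each interval's unseen part, in order, no set, no re-sort.


-- ===== PORT A =====
-- W_sorted = sorted(int(w) for w in W_attacked); out = set(W_sorted);
-- for i, w in enumerate(W_sorted): next_w = W_sorted[i+1] if i+1 < len(W_sorted) else T_proc;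
--   end = min(w + polish_window, next_w - 1, T_proc - 1); for t in range(w+1, end+1): out.add(t)
-- return sorted(out)   (int(w)/int(t) are identities on Int)
def select_hiera_polish_frames_py (W_attacked : List Int) (T_proc : Int) (polish_window : Int) : List Int :=
  let W_sorted := PySem.List.sorted W_attacked (fun x => x) false
  let out : PySem.Set Int :=
    (PySem.List.enumerate W_sorted 0).foldl (fun out iw =>
      let next_w : Int := if iw.1 + 1 < PySem.List.len W_sorted then PySem.List.pyGetD W_sorted (iw.1 + 1) 0 else T_proc
      let e : Int := min (min (iw.2 + polish_window) (next_w - 1)) (T_proc - 1)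
      (PySem.List.pyRange (iw.2 + 1) (e + 1) 1).foldl PySem.Set.add out)
      (PySem.Set.ofList W_sorted)
  PySem.List.sorted out (fun x => x) false

-- ===== PORT B =====
-- out = []; hi = None
-- for w in sorted(int(w) for w in W_attacked):
--   h = max(w, min(w + polish_window, T_proc - 1))
--   if hi is not None and w <= hi:
--     if h > hi: out.extend(range(hi+1, h+1)); hi = h
--   else: out.append(w); out.extend(range(w+1, h+1)); hi = h
-- return out
-- pvEI is the loop body's 'h'; pvStep is the loop body over state (out, hi).
def pvEI (T_proc polish_window w : Int) : Int := max w (min (w + polish_window) (T_proc - 1))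

def pvStep (T_proc polish_window : Int) (s : List Int × Option Int) (w : Int) : List Int × Option Int :=
  let h := pvEI T_proc polish_window w
  match s.2 with
  | some hi =>
    if w ≤ hi then
      if hi < h then (s.1 ++ PySem.List.pyRange (hi + 1) (h + 1) 1, some h) else s
    else (s.1 ++ [w] ++ PySem.List.pyRange (w + 1) (h + 1) 1, some h)
  | none => (s.1 ++ [w] ++ PySem.List.pyRange (w + 1) (h + 1) 1, some h)

def select_hiera_polish_frames_py_alt (W_attacked : List Int) (T_proc : Int) (polish_window : Int) : List Int :=
  ((PySem.List.sorted W_attacked (fun x => x) false).foldl (pvStep T_proc polish_window) ([], none)).1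

-- ===== PRECONDITION & SPEC =====
def Spec_select_hiera_polish_frames_py (W_attacked : List Int) (T_proc : Int) (polish_window : Int) (out : List Int) : Prop := out = select_hiera_polish_frames_py_alt W_attacked T_proc polish_window
instance (W_attacked : List Int) (T_proc : Int) (polish_window : Int) (out : List Int) : Decidable (Spec_select_hiera_polish_frames_py W_attacked T_proc polish_window out) := by unfold Spec_select_hiera_polish_frames_py; infer_instance

-- ===== CLAIM (what is proved, stated in full; the proofs are below) =====
def Claim_equal_select_hiera_polish_frames_py : Prop := ∀ (W_attacked : List Int) (T_proc : Int) (polish_window : Int), Dom_select_hiera_polish_frames_py W_attacked T_proc polish_window → Spec_select_hiera_polish_frames_py W_attacked T_proc polish_window (select_hiera_polish_frames_py W_attacked T_proc polish_window)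

-- ===== LEMMAS AND PROOFS =====

-- halo clip bound for a pair (insert, next insert), as A computes it
def pvE (T_proc polish_window : Int) (p : Int × Int) : Int :=
  min (min (p.1 + polish_window) (p.2 - 1)) (T_proc - 1)

-- adjacent pairs of a list, the last element paired with T
def pvPairs (l : List Int) (T : Int) : List (Int × Int) := l.zip (l.drop 1 ++ [T])

-- A's enumerate/lookahead loop reads exactly the adjacent pairs
lemma map_enum_pairs (l : List Int) (T : Int) :
    (PySem.List.enumerate l 0).map
      (fun iw => (iw.2, if iw.1 + 1 < PySem.List.len l then PySem.List.pyGetD l (iw.1 + 1) 0 else T))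
    = pvPairs l T := by
  apply List.ext_getElem
  · simp [pvPairs, PySem.List.length_enumerate]
    omega
  · intro k hk1 hk2
    have hkl : k < l.length := by simpa [PySem.List.length_enumerate] using hk1
    simp only [pvPairs, List.getElem_map, PySem.List.getElem_enumerate, List.getElem_zip]
    congr 1
    · by_cases h : k + 1 < l.length
      · have hc : (0 : Int) + (k : Int) + 1 < PySem.List.len l := by
          simp [PySem.List.len_eq]; omega
        rw [if_pos hc]
        have : (0 : Int) + (k : Int) + 1 = ((k + 1 : Nat) : Int) := by push_cast; ring
        rw [this, PySem.List.pyGetD_natCast l (k + 1) 0, List.getD_eq_getElem _ _ (by omega)]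
        rw [List.getElem_append_left (by simp; omega)]
        simp
      · have hc : ¬ ((0 : Int) + (k : Int) + 1 < PySem.List.len l) := by
          simp [PySem.List.len_eq]; omega
        rw [if_neg hc]
        rw [List.getElem_append_right (by simp; omega)]
        simp

-- membership in A's set-building fold
lemma mem_foldA (T pw x : Int) :
    ∀ (l : List (Int × Int)) (s : PySem.Set Int),
      (x ∈ l.foldl (fun out p =>
          (PySem.List.pyRange (p.1 + 1) (pvE T pw p + 1) 1).foldl PySem.Set.add out) s)
      ↔ x ∈ s ∨ ∃ p ∈ l, p.1 < x ∧ x ≤ pvE T pw p := by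
  intro l
  induction l with
  | nil => simp
  | cons a t ih =>
    intro s
    simp only [List.foldl_cons]
    rw [ih]
    have hupd : (PySem.List.pyRange (a.1 + 1) (pvE T pw a + 1) 1).foldl PySem.Set.add s
        = PySem.Set.update s (PySem.List.pyRange (a.1 + 1) (pvE T pw a + 1) 1) := rfl
    rw [hupd]
    simp only [PySem.Set.mem_update, PySem.List.mem_pyRange_one, List.mem_cons]
    constructor
    · rintro (⟨hs | hr⟩ | ⟨p, hp, h1, h2⟩)
      · exact Or.inl hs
      · exact Or.inr ⟨a, Or.inl rfl, by omega⟩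
      · exact Or.inr ⟨p, Or.inr hp, h1, h2⟩
    · rintro (hs | ⟨p, (rfl | hp), h1, h2⟩)
      · exact Or.inl (Or.inl hs)
      · exact Or.inl (Or.inr (by omega))
      · exact Or.inr ⟨p, hp, h1, h2⟩

-- A's fold keeps the set duplicate-free
lemma nodup_foldA (T pw : Int) :
    ∀ (l : List (Int × Int)) (s : PySem.Set Int), s.Nodup →
      (l.foldl (fun out p =>
          (PySem.List.pyRange (p.1 + 1) (pvE T pw p + 1) 1).foldl PySem.Set.add out) s).Nodup := by
  intro l
  induction l with
  | nil => intro s hs; simpa using hs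
  | cons a t ih =>
    intro s hs
    simp only [List.foldl_cons]
    exact ih _ (PySem.Set.nodup_update _ _ hs)

-- the halo intervals over adjacent pairs, characterised order-theoretically
lemma halo_iff (T pw x : Int) :
    ∀ (l : List Int), l.Pairwise (· ≤ ·) →
      ((∃ p ∈ pvPairs l T, p.1 < x ∧ x ≤ pvE T pw p) ↔
       (x ≤ T - 1 ∧ ∃ w ∈ l, w < x ∧ x ≤ w + pw ∧ ∀ w' ∈ l, w' ≤ w ∨ x < w')) := by
  intro l
  induction l with
  | nil => simp [pvPairs]
  | cons a t ih =>
    intro hpw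
    rcases hpw with _ | ⟨hle, hptail⟩
    cases t with
    | nil =>
      constructor
      · rintro ⟨p, hp, h1, h2⟩
        have hpe : p = (a, T) := by simpa [pvPairs] using hp
        subst hpe
        simp only [pvE, le_min_iff] at h2
        refine ⟨by omega, a, List.mem_cons_self .., by omega, by omega, ?_⟩
        intro w' hw'
        rcases List.mem_cons.1 hw' with rfl | h
        · exact Or.inl le_rfl
        · simp at h
      · rintro ⟨hxT, w, hw, h1, h2, _⟩
        rcases List.mem_cons.1 hw with rfl | h
        · refine ⟨(w, T), by simp [pvPairs], h1, ?_⟩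
          simp only [pvE, le_min_iff]
          omega
        · simp at h
    | cons b r =>
      have hab : a ≤ b := hle b (List.mem_cons_self ..)
      have hpairs : pvPairs (a :: b :: r) T = (a, b) :: pvPairs (b :: r) T := rfl
      rw [hpairs]
      have iht := ih hptail
      constructor
      · rintro ⟨p, hp, h1, h2⟩
        rcases List.mem_cons.1 hp with rfl | hp'
        · simp only [pvE, le_min_iff] at h2
          refine ⟨by omega, a, List.mem_cons_self .., by omega, by omega, ?_⟩
          rintro w' hw'
          rcases List.mem_cons.1 hw' with rfl | hw''
          · exact Or.inl le_rfl
          · rcases List.mem_cons.1 hw'' with rfl | hw3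
            · exact Or.inr (by omega)
            · have : b ≤ w' := (List.pairwise_cons.1 hptail).1 w' hw3
              exact Or.inr (by omega)
        · rcases iht.1 ⟨p, hp', h1, h2⟩ with ⟨hxT, w, hw, hw1, hw2, hw3⟩
          refine ⟨hxT, w, List.mem_cons_of_mem _ hw, hw1, hw2, ?_⟩
          rintro w' hw'
          rcases List.mem_cons.1 hw' with rfl | hw''
          · exact Or.inl (hle w hw)
          · exact hw3 w' hw''
      · rintro ⟨hxT, w, hw, hw1, hw2, hw3⟩
        rcases List.mem_cons.1 hw with rfl | hw'
        · rcases hw3 b (List.mem_cons_of_mem _ (List.mem_cons_self ..)) with hba | hxb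
          · have hab' : w = b := le_antisymm hab hba
            have : ∃ p ∈ pvPairs (b :: r) T, p.1 < x ∧ x ≤ pvE T pw p := by
              refine iht.2 ⟨hxT, b, List.mem_cons_self .., by omega, by omega, ?_⟩
              rintro w' hw''
              rcases hw3 w' (List.mem_cons_of_mem _ hw'') with h | h
              · exact Or.inl (by omega)
              · exact Or.inr h
            rcases this with ⟨p, hp, h⟩
            exact ⟨p, List.mem_cons_of_mem _ hp, h⟩
          · exact ⟨(w, b), List.mem_cons_self .., hw1, by simp only [pvE, le_min_iff]; omega⟩
        · rcases iht.2 ⟨hxT, w, hw', hw1, hw2, fun w' h => hw3 w' (List.mem_cons_of_mem _ h)⟩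
            with ⟨p, hp, h⟩
          exact ⟨p, List.mem_cons_of_mem _ hp, h⟩

-- x ≤ pvEI, unfolded to linear arithmetic
lemma le_pvEI_iff (T pw w x : Int) :
    x ≤ pvEI T pw w ↔ x ≤ w ∨ (x ≤ w + pw ∧ x ≤ T - 1) := by
  simp [pvEI]

-- a greatest element below x exists in any list containing one element below x
lemma exists_greatest_below (x : Int) :
    ∀ (l : List Int), (∃ w ∈ l, w < x) →
      ∃ m ∈ l, m < x ∧ ∀ w' ∈ l, w' < x → w' ≤ m := by
  intro l
  induction l with
  | nil => rintro ⟨w, hw, -⟩; simp at hw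
  | cons a t ih =>
    rintro ⟨w, hw, hwx⟩
    by_cases ht : ∃ w ∈ t, w < x
    · obtain ⟨m, hm, hmx, hmax⟩ := ih ht
      rcases lt_or_ge a x with hax | hax
      · rcases le_total a m with ham | ham
        · refine ⟨m, List.mem_cons_of_mem _ hm, hmx, ?_⟩
          intro w' hw' hwx'
          rcases List.mem_cons.1 hw' with rfl | h
          · exact ham
          · exact hmax w' h hwx'
        · refine ⟨a, List.mem_cons_self .., hax, ?_⟩
          intro w' hw' hwx'
          rcases List.mem_cons.1 hw' with rfl | h
          · exact le_rfl
          · exact le_trans (hmax w' h hwx') ham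
      · refine ⟨m, List.mem_cons_of_mem _ hm, hmx, ?_⟩
        intro w' hw' hwx'
        rcases List.mem_cons.1 hw' with rfl | h
        · omega
        · exact hmax w' h hwx'
    · have haw : w = a := by
        rcases List.mem_cons.1 hw with rfl | h
        · rfl
        · exact absurd ⟨w, h, hwx⟩ ht
      subst haw
      refine ⟨w, List.mem_cons_self .., hwx, ?_⟩
      intro w' hw' hwx'
      rcases List.mem_cons.1 hw' with rfl | h
      · exact le_rfl
      · exact absurd ⟨w', h, hwx'⟩ ht

-- A's whole set, characterised as the union of the per-insert closed intervals [w, pvEI w]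
lemma union_iff (T pw x : Int) (l : List Int) :
    ((x ∈ l ∨ (x ≤ T - 1 ∧ ∃ w ∈ l, w < x ∧ x ≤ w + pw ∧ ∀ w' ∈ l, w' ≤ w ∨ x < w'))
      ↔ ∃ w ∈ l, w ≤ x ∧ x ≤ pvEI T pw w) := by
  constructor
  · rintro (hx | ⟨hxT, w, hw, h1, h2, -⟩)
    · exact ⟨x, hx, le_rfl, le_max_left _ _⟩
    · exact ⟨w, hw, by omega, (le_pvEI_iff T pw w x).2 (Or.inr ⟨h2, hxT⟩)⟩
  · rintro ⟨w, hw, h1, h2⟩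
    by_cases hxl : x ∈ l
    · exact Or.inl hxl
    · have hwx : w < x := lt_of_le_of_ne h1 (fun h => hxl (h ▸ hw))
      have h2' : x ≤ w + pw ∧ x ≤ T - 1 := by
        rcases (le_pvEI_iff T pw w x).1 h2 with h | h
        · omega
        · exact h
      obtain ⟨m, hm, hmx, hmax⟩ := exists_greatest_below x l ⟨w, hw, hwx⟩
      refine Or.inr ⟨h2'.2, m, hm, hmx, by have := hmax w hw hwx; omega, ?_⟩
      intro w' hw'
      rcases lt_or_ge w' x with h | h
      · exact Or.inl (hmax w' hw' h)
      · exact Or.inr (lt_of_le_of_ne h (fun hh => hxl (hh ▸ hw')))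

-- the invariant of B's sweep: out is the sorted union of the processed intervals,
-- hi the attained running maximum of their right ends
def pvInv (T pw : Int) (processed : List Int) (s : List Int × Option Int) : Prop :=
  s.1.Pairwise (· < ·) ∧
  (∀ x : Int, x ∈ s.1 ↔ ∃ w ∈ processed, w ≤ x ∧ x ≤ pvEI T pw w) ∧
  (match s.2 with
   | none => processed = []
   | some v => (∃ w ∈ processed, pvEI T pw w = v) ∧ (∀ w ∈ processed, pvEI T pw w ≤ v) ∧
       ∀ x ∈ s.1, x ≤ v)

-- one step of B's sweep preserves the invariant
lemma pvInv_step (T pw : Int) (processed : List Int) (s : List Int × Option Int) (w : Int)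
    (hinv : pvInv T pw processed s) (hmono : ∀ w' ∈ processed, w' ≤ w) :
    pvInv T pw (processed ++ [w]) (pvStep T pw s w) := by
  obtain ⟨hpw, hmem, hv⟩ := hinv
  have hwE : w ≤ pvEI T pw w := le_max_left _ _
  have hmemw : ∀ y : Int, y ∈ processed ++ [w] ↔ y ∈ processed ∨ y = w := by intro y; simp
  have hblock : (w :: PySem.List.pyRange (w + 1) (pvEI T pw w + 1) 1).Pairwise (· < ·) := by
    refine List.pairwise_cons.2 ⟨?_, PySem.List.pairwise_lt_pyRange_one _ _⟩
    intro y hy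
    have := (PySem.List.mem_pyRange_one.1 hy).1
    omega
  cases hs : s.2 with
  | none =>
    rw [hs] at hv
    simp only at hv
    subst hv
    have hnil : s.1 = [] := by
      cases hcons : s.1 with
      | nil => rfl
      | cons a t =>
        exfalso
        have := (hmem a).1 (by rw [hcons]; exact List.mem_cons_self ..)
        simp at this
    simp only [pvStep, hs, hnil, List.nil_append, List.singleton_append]
    refine ⟨hblock, ?_, ?_⟩
    · intro x
      constructor
      · intro hx
        rcases List.mem_cons.1 hx with rfl | hx
        · exact ⟨x, by simp, le_rfl, hwE⟩
        · have := PySem.List.mem_pyRange_one.1 hx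
          exact ⟨w, by simp, by omega, by omega⟩
      · rintro ⟨w', hw', h1, h2⟩
        have hww : w' = w := by simpa using hw'
        subst hww
        by_cases hxw : x = w'
        · exact List.mem_cons.2 (Or.inl hxw)
        · exact List.mem_cons.2 (Or.inr (PySem.List.mem_pyRange_one.2 ⟨by omega, by omega⟩))
    · refine ⟨⟨w, by simp, rfl⟩, by simp, ?_⟩
      intro x hx
      rcases List.mem_cons.1 hx with rfl | hx
      · exact hwE
      · have := PySem.List.mem_pyRange_one.1 hx
        omega
  | some v =>
    rw [hs] at hv
    obtain ⟨⟨wst, hwst, hEst⟩, hub, hle⟩ := hv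
    by_cases hwv : w ≤ v
    · by_cases hvh : v < pvEI T pw w
      · -- overlap, extend up to the new end
        simp only [pvStep, hs, if_pos hwv, if_pos hvh]
        refine ⟨?_, ?_, ?_⟩
        · refine List.pairwise_append.2 ⟨hpw, PySem.List.pairwise_lt_pyRange_one _ _, ?_⟩
          intro a ha b hb
          have hb' := (PySem.List.mem_pyRange_one.1 hb).1
          have := hle a ha
          omega
        · intro x
          constructor
          · intro hx
            rcases List.mem_append.1 hx with hx | hx
            · obtain ⟨w', hw', h1, h2⟩ := (hmem x).1 hx
              exact ⟨w', (hmemw w').2 (Or.inl hw'), h1, h2⟩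
            · have := PySem.List.mem_pyRange_one.1 hx
              exact ⟨w, (hmemw w).2 (Or.inr rfl), by omega, by omega⟩
          · rintro ⟨w', hw', h1, h2⟩
            rcases (hmemw w').1 hw' with h | rfl
            · exact List.mem_append.2 (Or.inl ((hmem x).2 ⟨w', h, h1, h2⟩))
            · by_cases hxv : x ≤ v
              · exact List.mem_append.2 (Or.inl ((hmem x).2
                  ⟨wst, hwst, le_trans (hmono wst hwst) h1, hEst ▸ hxv⟩))
              · exact List.mem_append.2 (Or.inr (PySem.List.mem_pyRange_one.2 ⟨by omega, by omega⟩))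
        · refine ⟨⟨w, (hmemw w).2 (Or.inr rfl), rfl⟩, ?_, ?_⟩
          · intro w' hw'
            rcases (hmemw w').1 hw' with h | rfl
            · exact le_trans (hub w' h) (by omega)
            · exact le_rfl
          · intro x hx
            rcases List.mem_append.1 hx with h | h
            · exact le_trans (hle x h) (by omega)
            · have := PySem.List.mem_pyRange_one.1 h
              omega
      · -- fully covered already: state unchanged
        simp only [pvStep, hs, if_pos hwv, if_neg hvh]
        refine ⟨hpw, ?_, ?_⟩
        · intro x
          rw [hmem]
          constructor
          · rintro ⟨w', hw', h1, h2⟩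
            exact ⟨w', (hmemw w').2 (Or.inl hw'), h1, h2⟩
          · rintro ⟨w', hw', h1, h2⟩
            rcases (hmemw w').1 hw' with h | rfl
            · exact ⟨w', h, h1, h2⟩
            · exact ⟨wst, hwst, le_trans (hmono wst hwst) h1, hEst ▸ (by omega)⟩
        · rw [hs]
          refine ⟨⟨wst, (hmemw wst).2 (Or.inl hwst), hEst⟩, ?_, hle⟩
          intro w' hw'
          rcases (hmemw w').1 hw' with h | rfl
          · exact hub w' h
          · omega
    · -- disjoint: append the whole new interval
      simp only [pvStep, hs, if_neg hwv]
      have hout : s.1 ++ [w] ++ PySem.List.pyRange (w + 1) (pvEI T pw w + 1) 1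
          = s.1 ++ (w :: PySem.List.pyRange (w + 1) (pvEI T pw w + 1) 1) := by
        rw [List.append_assoc]; rfl
      rw [hout]
      refine ⟨?_, ?_, ?_⟩
      · refine List.pairwise_append.2 ⟨hpw, hblock, ?_⟩
        intro a ha b hb
        have hav := hle a ha
        rcases List.mem_cons.1 hb with rfl | hb
        · omega
        · have := (PySem.List.mem_pyRange_one.1 hb).1
          omega
      · intro x
        constructor
        · intro hx
          rcases List.mem_append.1 hx with hx | hx
          · obtain ⟨w', hw', h1, h2⟩ := (hmem x).1 hx
            exact ⟨w', (hmemw w').2 (Or.inl hw'), h1, h2⟩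
          · rcases List.mem_cons.1 hx with rfl | hx
            · exact ⟨x, (hmemw x).2 (Or.inr rfl), le_rfl, hwE⟩
            · have := PySem.List.mem_pyRange_one.1 hx
              exact ⟨w, (hmemw w).2 (Or.inr rfl), by omega, by omega⟩
        · rintro ⟨w', hw', h1, h2⟩
          rcases (hmemw w').1 hw' with h | rfl
          · exact List.mem_append.2 (Or.inl ((hmem x).2 ⟨w', h, h1, h2⟩))
          · refine List.mem_append.2 (Or.inr ?_)
            by_cases hxw : x = w'
            · exact List.mem_cons.2 (Or.inl hxw)
            · exact List.mem_cons.2 (Or.inr (PySem.List.mem_pyRange_one.2 ⟨by omega, by omega⟩))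
      · refine ⟨⟨w, (hmemw w).2 (Or.inr rfl), rfl⟩, ?_, ?_⟩
        · intro w' hw'
          rcases (hmemw w').1 hw' with h | rfl
          · exact le_trans (hub w' h) (by omega)
          · exact le_rfl
        · intro x hx
          rcases List.mem_append.1 hx with h | h
          · exact le_trans (hle x h) (by omega)
          · rcases List.mem_cons.1 h with rfl | h
            · exact hwE
            · have := (PySem.List.mem_pyRange_one.1 h)
              omega
-- B's whole sweep preserves the invariant
lemma pvInv_fold (T pw : Int) :
    ∀ (rest processed : List Int) (s : List Int × Option Int),
      pvInv T pw processed s →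
      (∀ w' ∈ processed, ∀ w ∈ rest, w' ≤ w) →
      rest.Pairwise (· ≤ ·) →
      pvInv T pw (processed ++ rest) (rest.foldl (pvStep T pw) s) := by
  intro rest
  induction rest with
  | nil => intro processed s h _ _; simpa using h
  | cons a t ih =>
    intro processed s hinv hmono hsort
    rcases List.pairwise_cons.1 hsort with ⟨hat, htsort⟩
    have h1 := pvInv_step T pw processed s a hinv
      (fun w' hw' => hmono w' hw' a (List.mem_cons_self ..))
    have h2 := ih (processed ++ [a]) _ h1 ?_ htsort
    · simpa using h2
    · intro w' hw' w hw
      rcases List.mem_append.1 hw' with h | h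
      · exact hmono w' h w (List.mem_cons_of_mem _ hw)
      · rw [List.mem_singleton.1 h]
        exact hat w hw

-- port A rewritten over adjacent pairs
lemma portA_eq (W : List Int) (T pw : Int) :
    select_hiera_polish_frames_py W T pw =
      PySem.List.sorted
        ((pvPairs (PySem.List.sorted W (fun x => x) false) T).foldl (fun out p =>
          (PySem.List.pyRange (p.1 + 1) (pvE T pw p + 1) 1).foldl PySem.Set.add out)
          (PySem.Set.ofList (PySem.List.sorted W (fun x => x) false)))
        (fun x => x) false := by
  show PySem.List.sorted
      ((PySem.List.enumerate (PySem.List.sorted W (fun x => x) false) 0).foldl (fun out iw =>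
        (PySem.List.pyRange (iw.2 + 1)
          (pvE T pw (iw.2, if iw.1 + 1 < PySem.List.len (PySem.List.sorted W (fun x => x) false)
            then PySem.List.pyGetD (PySem.List.sorted W (fun x => x) false) (iw.1 + 1) 0 else T) + 1) 1).foldl
          PySem.Set.add out)
        (PySem.Set.ofList (PySem.List.sorted W (fun x => x) false)))
      (fun x => x) false = _
  rw [← map_enum_pairs (PySem.List.sorted W (fun x => x) false) T, List.foldl_map]

-- ===== VERDICT (by name: the statement is the Claim_ definition above) =====
theorem select_hiera_polish_frames_py_spec : Claim_equal_select_hiera_polish_frames_py := by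
  intro W T pw _
  unfold Spec_select_hiera_polish_frames_py
  rw [portA_eq]
  set Ws := PySem.List.sorted W (fun x => x) false with hWs
  set SA := (pvPairs Ws T).foldl (fun out p =>
      (PySem.List.pyRange (p.1 + 1) (pvE T pw p + 1) 1).foldl PySem.Set.add out)
      (PySem.Set.ofList Ws) with hSA
  have hWsle : Ws.Pairwise (· ≤ ·) := by
    simpa using PySem.List.sorted_pairwise W (fun x : Int => x)
  have hInv : pvInv T pw Ws (Ws.foldl (pvStep T pw) ([], none)) := by
    have h0 : pvInv T pw [] (([] : List Int), (none : Option Int)) := by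
      refine ⟨List.Pairwise.nil, by simp, rfl⟩
    simpa using pvInv_fold T pw Ws [] ([], none) h0 (by simp) hWsle
  obtain ⟨hBpw, hBmem, -⟩ := hInv
  set B := (Ws.foldl (pvStep T pw) ([], none)).1 with hB
  have hmem : ∀ x : Int, x ∈ B ↔ x ∈ SA := by
    intro x
    rw [hBmem x, hSA, mem_foldA, PySem.Set.mem_ofList,
      halo_iff T pw x Ws hWsle, ← union_iff T pw x Ws]
  have hSAnodup : SA.Nodup :=
    nodup_foldA T pw _ _ (PySem.Set.nodup_ofList Ws)
  have hBnodup : B.Nodup := hBpw.imp (fun h => ne_of_lt h)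
  have hperm : B.Perm SA := (List.perm_ext_iff_of_nodup hBnodup hSAnodup).2 hmem
  exact PySem.List.sorted_eq_of_perm_of_pairwise_lt _ _ _ hperm hBpw
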